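-- pv_equiv track=rewrite | github.com/jdelpino-dev/thinkpython | e10_12_interlocked_dicts.py | de_interlock_all_two_interloks
-- ===== SOURCE A (Python) =====
-- def make_comp_two_interloks(string, lenght1, lenght2, comp_n):
--     string_lenght = len(string)
--     comp = ""
--     shared_lenght = min(lenght1, lenght2)
--     if comp_n == 1:
--         lenght = lenght1
--         start = 0
--         first_end = (2 * shared_lenght) - 1
--     else:
--         lenght = lenght2
--         start = 1
--         first_end = 2 * shared_lenght
--     for k in range(start, first_end, 2):
--         comp += string[k]
--     current_lenght = len(comp)
--     if current_lenght < lenght: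
--         second_start = 2 * shared_lenght
--         end = string_lenght
--         for m in range(second_start, end):
--             comp += string[m]
--     return comp
--
-- def de_interlock_all_two_interloks(string):
--     '''De-interlocks any string in all its possible
--     interlocked pairs.
--     '''
--     lenght = len(string)
--     comps_list = []
--     for i in range(1, lenght):
--         j = lenght - i
--         comp1 = make_comp_two_interloks(string, i, j, 1)
--         comp2 = make_comp_two_interloks(string, i, j, 2)
--         comps = (comp1, comp2)
--         comps_list.append(comps)
--     return comps_list
-- ===== SOURCE B (Python) =====
-- def de_interlock_all_two_interloks(string):
--     '''De-interlocks any string in all its possible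
--     interlocked pairs.
--     '''
--     # deal the characters once into the two interleave tracks
--     evens, odds, take_even = [], [], True
--     for ch in string:
--         (evens if take_even else odds).append(ch)
--         take_even = not take_even
--     n = len(string)
--     comps_list = []
--     for i in range(1, n):
--         shared = min(i, n - i)
--         tail = string[2 * shared:]
--         comp1 = "".join(evens[:shared]) + (tail if shared < i else "")
--         comp2 = "".join(odds[:shared]) + (tail if shared < n - i else "")
--         comps_list.append((comp1, comp2))
--     return comps_list
-- ===== Notes on version B (the rewrite author's own statement) =====
-- stated objective: alternative
-- what changed: B deals the characters once into the evens/odds interleave tracks and builds each pair by prefix-slicing those precomputed tracks plus a shared tail, replacing A's per-split helper that re-walks the even/odd indices of the string for every i with char-by-char string concatenation.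
import Mathlib
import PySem

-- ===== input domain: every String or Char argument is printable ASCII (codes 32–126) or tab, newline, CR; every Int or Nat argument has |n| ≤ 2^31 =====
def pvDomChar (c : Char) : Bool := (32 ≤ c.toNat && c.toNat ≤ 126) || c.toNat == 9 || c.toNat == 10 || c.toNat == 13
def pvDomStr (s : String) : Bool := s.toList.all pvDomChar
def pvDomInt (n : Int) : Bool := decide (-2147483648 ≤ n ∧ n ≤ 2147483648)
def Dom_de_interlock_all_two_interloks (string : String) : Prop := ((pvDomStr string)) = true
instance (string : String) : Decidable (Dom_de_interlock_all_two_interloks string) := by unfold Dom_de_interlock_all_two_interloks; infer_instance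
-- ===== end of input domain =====

-- B deals the string once into the two interleave tracks and then emits each pair by
-- prefix-slicing those tracks, instead of A's per-i helper that re-walks the even/odd
-- indices of the string for every split point (objective: alternative decomposition).

-- ===== PORT A =====
-- literal port of make_comp_two_interloks; string[k] is ported as pyGetD (every index
-- the Python loops reach is in range, so pyGetD is exact there)
def pvMakeComp (s : List Char) (lenght1 lenght2 compN : Int) : List Char :=
  let stringLenght : Int := PySem.List.len s
  let sharedLenght : Int := min lenght1 lenght2
  let lenght : Int := if compN = 1 then lenght1 else lenght2
  let start : Int := if compN = 1 then 0 else 1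
  let firstEnd : Int := if compN = 1 then 2 * sharedLenght - 1 else 2 * sharedLenght
  let comp :=
    (PySem.List.pyRange start firstEnd 2).foldl (fun c k => c ++ [PySem.List.pyGetD s k ' ']) []
  let currentLenght : Int := PySem.List.len comp
  if currentLenght < lenght then
    let secondStart := 2 * sharedLenght
    let end_ := stringLenght
    (PySem.List.pyRange secondStart end_).foldl (fun c m => c ++ [PySem.List.pyGetD s m ' ']) comp
  else comp

def de_interlock_all_two_interloks (string : String) : List (String × String) :=
  let lenght : Int := PySem.Str.len string
  (PySem.List.pyRange 1 lenght).foldl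
    (fun compsList i =>
      let j := lenght - i
      let comp1 := pvMakeComp string.toList i j 1
      let comp2 := pvMakeComp string.toList i j 2
      compsList ++ [(String.ofList comp1, String.ofList comp2)]) []

-- ===== PORT B =====
-- one pass dealing the characters alternately into the evens/odds tracks
def pvDealStep (st : List Char × List Char × Bool) (c : Char) : List Char × List Char × Bool :=
  match st with
  | (e, o, true) => (e ++ [c], o, false)
  | (e, o, false) => (e, o ++ [c], true)

def de_interlock_all_two_interloks_alt (string : String) : List (String × String) :=
  let l := string.toList
  let st := l.foldl pvDealStep ([], [], true)
  let evens := st.1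
  let odds := st.2.1
  let n : Int := PySem.Str.len string
  (PySem.List.pyRange 1 n).foldl
    (fun compsList i =>
      let shared := min i (n - i)
      let tail := PySem.List.slice l (some (2 * shared)) none
      let comp1 := PySem.List.slice evens none (some shared) ++ (if shared < i then tail else [])
      let comp2 := PySem.List.slice odds none (some shared) ++ (if shared < n - i then tail else [])
      compsList ++ [(String.ofList comp1, String.ofList comp2)]) []

-- ===== PRECONDITION & SPEC =====
def Spec_de_interlock_all_two_interloks (string : String) (out : List (String × String)) : Prop := out = de_interlock_all_two_interloks_alt string
instance (string : String) (out : List (String × String)) : Decidable (Spec_de_interlock_all_two_interloks string out) := by unfold Spec_de_interlock_all_two_interloks; infer_instance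

-- ===== CLAIM (what is proved, stated in full; the proofs are below) =====
def Claim_equal_de_interlock_all_two_interloks : Prop := ∀ (string : String), Dom_de_interlock_all_two_interloks string → Spec_de_interlock_all_two_interloks string (de_interlock_all_two_interloks string)

-- ===== LEMMAS AND PROOFS =====

-- proof-side companion of B's dealing pass: pvDeal l = (chars at even indices, chars at odd indices)
def pvDeal : List Char → List Char × List Char
  | [] => ([], [])
  | c :: r => (c :: (pvDeal r).2, (pvDeal r).1)

lemma pvDeal_foldl : ∀ (l : List Char) (e o : List Char),
    l.foldl pvDealStep (e, o, true) = (e ++ (pvDeal l).1, o ++ (pvDeal l).2, decide (l.length % 2 = 0))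
    ∧ l.foldl pvDealStep (e, o, false) = (e ++ (pvDeal l).2, o ++ (pvDeal l).1, decide (l.length % 2 = 1)) := by
  intro l
  induction l with
  | nil => simp [pvDeal]
  | cons c r ih =>
      intro e o
      constructor
      · show List.foldl pvDealStep (e ++ [c], o, false) r = _
        rw [(ih (e ++ [c]) o).2]
        simp [pvDeal]
        omega
      · show List.foldl pvDealStep (e, o ++ [c], true) r = _
        rw [(ih e (o ++ [c])).1]
        simp [pvDeal]
        omega

lemma pvDeal_get : ∀ (l : List Char) (k : Nat),
    (pvDeal l).1[k]? = l[2 * k]? ∧ (pvDeal l).2[k]? = l[2 * k + 1]? := by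
  intro l
  induction l with
  | nil => simp [pvDeal]
  | cons c r ih =>
      intro k
      cases k with
      | zero =>
          refine ⟨by simp [pvDeal], ?_⟩
          simpa [pvDeal] using (ih 0).1
      | succ k =>
          constructor
          · have e : 2 * (k + 1) = 2 * k + 1 + 1 := by omega
            simpa [pvDeal, e] using (ih k).2
          · simpa [pvDeal] using (ih (k + 1)).1

lemma pvDeal_len : ∀ (l : List Char),
    (pvDeal l).1.length = (l.length + 1) / 2 ∧ (pvDeal l).2.length = l.length / 2 := by
  intro l
  induction l with
  | nil => simp [pvDeal]
  | cons c r ih => simp [pvDeal, ih.1, ih.2]; omega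

lemma pvEvens_take (l : List Char) (s : Nat) (hs : 2 * s ≤ l.length) :
    (List.range s).map (fun (k : Nat) => PySem.List.pyGetD l (0 + 2 * (k : Int)) ' ')
      = (pvDeal l).1.take s := by
  apply List.ext_getElem?
  intro k
  by_cases hk : k < s
  · have h2k : 2 * k < l.length := by omega
    have hcast : (0 : Int) + 2 * (k : Int) = ((2 * k : Nat) : Int) := by push_cast; ring
    rw [List.getElem?_map, List.getElem?_range hk]
    simp only [Option.map_some, hcast, PySem.List.pyGetD_natCast]
    rw [List.getElem?_take_of_lt hk, (pvDeal_get l k).1,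
        List.getD_eq_getElem l ' ' h2k, List.getElem?_eq_getElem h2k]
  · have h1 : (((List.range s).map (fun (k : Nat) => PySem.List.pyGetD l (0 + 2 * (k : Int)) ' '))).length ≤ k := by
      simp; omega
    have h2 : ((pvDeal l).1.take s).length ≤ k := by
      simp [(pvDeal_len l).1]; omega
    rw [List.getElem?_eq_none h1, List.getElem?_eq_none h2]

lemma pvOdds_take (l : List Char) (s : Nat) (hs : 2 * s ≤ l.length) :
    (List.range s).map (fun (k : Nat) => PySem.List.pyGetD l (1 + 2 * (k : Int)) ' ')
      = (pvDeal l).2.take s := by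
  apply List.ext_getElem?
  intro k
  by_cases hk : k < s
  · have h2k : 2 * k + 1 < l.length := by omega
    have hcast : (1 : Int) + 2 * (k : Int) = ((2 * k + 1 : Nat) : Int) := by push_cast; ring
    rw [List.getElem?_map, List.getElem?_range hk]
    simp only [Option.map_some, hcast, PySem.List.pyGetD_natCast]
    rw [List.getElem?_take_of_lt hk, (pvDeal_get l k).2,
        List.getD_eq_getElem l ' ' h2k, List.getElem?_eq_getElem h2k]
  · have h1 : (((List.range s).map (fun (k : Nat) => PySem.List.pyGetD l (1 + 2 * (k : Int)) ' '))).length ≤ k := by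
      simp; omega
    have h2 : ((pvDeal l).2.take s).length ≤ k := by
      simp [(pvDeal_len l).2]; omega
    rw [List.getElem?_eq_none h1, List.getElem?_eq_none h2]

lemma pvMakeComp1_eq (l : List Char) (i j : Int) (hi : 1 ≤ i) (hj : 1 ≤ j)
    (hn : i + j = l.length) :
    pvMakeComp l i j 1
      = (pvDeal l).1.take (min i j).toNat
        ++ (if min i j < i then l.drop (2 * min i j).toNat else []) := by
  have hml : min i j ≤ i := min_le_left i j
  have hmr : min i j ≤ j := min_le_right i j
  have hm1 : 1 ≤ min i j := le_min hi hj
  have hmn : 2 * min i j ≤ (l.length : Int) := by omega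
  set m := min i j with hmdef
  set s : Nat := m.toNat with hsdef
  have hs : 2 * s ≤ l.length := by omega
  unfold pvMakeComp
  simp only [reduceIte, PySem.List.foldl_append_singleton_eq_map, List.nil_append]
  rw [PySem.List.pyRange_of_pos 0 (2 * m - 1) (by omega), if_pos (by omega : (0 : Int) < 2 * m - 1),
      show ((2 * m - 1 - 0 + 2 - 1) / 2).toNat = s by omega, List.map_map]
  have hcomp : (List.range s).map ((fun k => PySem.List.pyGetD l k ' ') ∘ fun (k : Nat) => (0 : Int) + 2 * (k : Int))
      = (pvDeal l).1.take s := pvEvens_take l s hs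
  rw [hcomp]
  have hlen : ((pvDeal l).1.take s).length = s := by
    rw [List.length_take, (pvDeal_len l).1]; omega
  by_cases hcond : m < i
  · rw [if_pos (by rw [PySem.List.len_eq, hlen]; omega), if_pos hcond,
        PySem.List.map_pyGetD_pyRange l ' ' (by omega : (0 : Int) ≤ 2 * m)]
  · rw [if_neg (by rw [PySem.List.len_eq, hlen]; omega), if_neg hcond, List.append_nil]

lemma pvMakeComp2_eq (l : List Char) (i j : Int) (hi : 1 ≤ i) (hj : 1 ≤ j)
    (hn : i + j = l.length) :
    pvMakeComp l i j 2
      = (pvDeal l).2.take (min i j).toNat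
        ++ (if min i j < j then l.drop (2 * min i j).toNat else []) := by
  have hml : min i j ≤ i := min_le_left i j
  have hmr : min i j ≤ j := min_le_right i j
  have hm1 : 1 ≤ min i j := le_min hi hj
  have hmn : 2 * min i j ≤ (l.length : Int) := by omega
  set m := min i j with hmdef
  set s : Nat := m.toNat with hsdef
  have hs : 2 * s ≤ l.length := by omega
  unfold pvMakeComp
  simp only [Int.reduceEq, reduceIte, PySem.List.foldl_append_singleton_eq_map, List.nil_append]
  rw [PySem.List.pyRange_of_pos 1 (2 * m) (by omega), if_pos (by omega : (1 : Int) < 2 * m),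
      show ((2 * m - 1 + 2 - 1) / 2).toNat = s by omega, List.map_map]
  have hcomp : (List.range s).map ((fun k => PySem.List.pyGetD l k ' ') ∘ fun (k : Nat) => (1 : Int) + 2 * (k : Int))
      = (pvDeal l).2.take s := pvOdds_take l s hs
  rw [hcomp]
  have hlen : ((pvDeal l).2.take s).length = s := by
    rw [List.length_take, (pvDeal_len l).2]; omega
  by_cases hcond : m < j
  · rw [if_pos (by rw [PySem.List.len_eq, hlen]; omega), if_pos hcond,
        PySem.List.map_pyGetD_pyRange l ' ' (by omega : (0 : Int) ≤ 2 * m)]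
  · rw [if_neg (by rw [PySem.List.len_eq, hlen]; omega), if_neg hcond, List.append_nil]

-- ===== VERDICT (by name: the statement is the Claim_ definition above) =====
theorem de_interlock_all_two_interloks_spec : Claim_equal_de_interlock_all_two_interloks := by
  intro string _
  unfold Spec_de_interlock_all_two_interloks
  simp only [de_interlock_all_two_interloks, de_interlock_all_two_interloks_alt]
  rw [(pvDeal_foldl string.toList [] []).1]
  simp only [List.nil_append, PySem.Str.len_eq,
    PySem.List.foldl_append_singleton_eq_map]
  apply List.map_congr_left
  intro i hi
  set l := string.toList with hl
  obtain ⟨hi1, hi2⟩ := (PySem.List.mem_pyRange_one (a := 1) (b := (l.length : Int)) (x := i)).1 hi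
  have hj1 : 1 ≤ (l.length : Int) - i := by omega
  have hsum : i + ((l.length : Int) - i) = (l.length : Int) := by ring
  have hmin0 : (0 : Int) ≤ min i ((l.length : Int) - i) := by
    have := le_min hi1 hj1; omega
  rw [pvMakeComp1_eq l i ((l.length : Int) - i) hi1 hj1 hsum,
      pvMakeComp2_eq l i ((l.length : Int) - i) hi1 hj1 hsum,
      PySem.List.slice_to _ hmin0, PySem.List.slice_to _ hmin0,
      PySem.List.slice_from _ (by omega : (0 : Int) ≤ 2 * min i ((l.length : Int) - i))]
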